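-- pv_equiv track=rewrite | github.com/JaofourthsOhappy/comprog1 | Com_prog1/ศ.สเนป/Homework/L21.py | triple_digits
-- ===== SOURCE A (Python) =====
-- def triple_digits(n):
--     """Given a positive integer n, returns a number with each digit tripled.
--
--     >>> triple_digits(1234)
--     111222333444
--     >>> triple_digits(89643)
--     888999666444333
--     """
--     sum = 0
--     mult_factor = 1
--     while n > 0:
--         rem_digit = n % 10
--         sum += rem_digit * mult_factor
--         mult_factor = mult_factor * 10
--         sum += rem_digit * mult_factor
--         mult_factor = mult_factor * 10
--         sum += rem_digit * mult_factor
--         mult_factor = mult_factor * 10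
--         n = n // 10
--     return sum
-- ===== SOURCE B (Python) =====
-- def triple_digits(n):
--     """Number with each digit of n tripled; 0 for n <= 0."""
--     if n <= 0:
--         return 0
--     return triple_digits(n // 10) * 1000 + n % 10 * 111
-- ===== Notes on version B (the rewrite author's own statement) =====
-- stated objective: simpler
-- what changed: Replaces A's iterative LSB-first loop with running sum and power-of-ten multiplier state by a two-line accumulator-free recursion that shifts the recursive result three decimal places and adds the tripled last digit.
import Mathlib
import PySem

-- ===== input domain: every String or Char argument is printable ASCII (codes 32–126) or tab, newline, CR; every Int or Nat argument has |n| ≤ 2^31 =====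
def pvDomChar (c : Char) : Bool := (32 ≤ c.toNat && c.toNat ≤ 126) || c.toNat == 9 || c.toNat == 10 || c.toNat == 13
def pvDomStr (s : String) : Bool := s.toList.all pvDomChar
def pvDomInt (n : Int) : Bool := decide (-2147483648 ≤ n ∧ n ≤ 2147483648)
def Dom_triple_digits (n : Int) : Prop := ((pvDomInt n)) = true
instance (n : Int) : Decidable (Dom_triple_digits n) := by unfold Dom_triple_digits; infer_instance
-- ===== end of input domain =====

-- B replaces A's iterative accumulator loop by a two-line recursion triple(n//10)*1000 + (n%10)*111 (simpler, same cost).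


-- ===== PORT A =====
-- the while loop of A: state (n, sum, mult_factor), body transliterated step for step
def tdLoop (n sum mult : Int) : Int :=
  if hn : n > 0 then
    let rem := PySem.Int.mod n 10
    let sum := sum + rem * mult
    let mult := mult * 10
    let sum := sum + rem * mult
    let mult := mult * 10
    let sum := sum + rem * mult
    let mult := mult * 10
    tdLoop (PySem.Int.floordiv n 10) sum mult
  else sum
termination_by n.toNat
decreasing_by
  rw [PySem.Int.floordiv_eq_ediv_of_pos (by omega : (0:Int) < 10)]
  omega

def triple_digits (n : Int) : Int := tdLoop n 0 1

-- ===== PORT B =====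
def triple_digits_alt (n : Int) : Int :=
  if hn : n ≤ 0 then 0
  else triple_digits_alt (PySem.Int.floordiv n 10) * 1000 + PySem.Int.mod n 10 * 111
termination_by n.toNat
decreasing_by
  rw [PySem.Int.floordiv_eq_ediv_of_pos (by omega : (0:Int) < 10)]
  omega

-- ===== PRECONDITION & SPEC =====
def Spec_triple_digits (n : Int) (out : Int) : Prop := out = triple_digits_alt n
instance (n : Int) (out : Int) : Decidable (Spec_triple_digits n out) := by unfold Spec_triple_digits; infer_instance

-- ===== CLAIM (what is proved, stated in full; the proofs are below) =====
def Claim_equal_triple_digits : Prop := ∀ (n : Int), Dom_triple_digits n → Spec_triple_digits n (triple_digits n)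

-- ===== LEMMAS AND PROOFS =====
-- loop invariant: A's loop from state (n, sum, mult) returns sum + mult * B(n)
theorem tdLoop_eq_alt (n sum mult : Int) :
    tdLoop n sum mult = sum + mult * triple_digits_alt n := by
  induction n, sum, mult using tdLoop.induct with
  | case1 n sum mult hn rem sum1 mult1 sum2 mult2 sum3 mult3 ih =>
    rw [tdLoop]
    simp only [hn, dite_true]
    rw [ih]
    conv_rhs => rw [triple_digits_alt]
    simp only [show ¬ n ≤ 0 by omega, dite_false]
    simp only [rem, sum1, mult1, sum2, mult2, sum3, mult3]
    ring
  | case2 n sum mult hn =>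
    rw [tdLoop, triple_digits_alt]
    simp only [hn, dite_false, show n ≤ 0 by omega, dite_true, mul_zero, add_zero]

-- ===== VERDICT (by name: the statement is the Claim_ definition above) =====
theorem triple_digits_spec : Claim_equal_triple_digits := by
  intro n _
  unfold Spec_triple_digits triple_digits
  rw [tdLoop_eq_alt]
  ring
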